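-- pv_equiv track=rewrite | github.com/aws-samples/aws-cudos-framework-deployment | cid/helpers/quicksight/dashboard_patching.py | format_field_name
-- ===== SOURCE A (Python) =====
-- def format_field_name(field_name: str, ignore_prefix: bool=False) -> str:
--     """Format field name for display in the filter title.
--         assert format_field_name('account_name') == 'Account Name'
--         assert format_field_name('a_c_r_o_n_y_m') == 'ACRONYM'
--         assert format_field_name('tag_a_c_r_o_n_y_m') == 'Tag ACRONYM'
--         assert format_field_name('tag_service') == 'Tag Service'
--     """
--     parts = field_name.split('_')
--     result = []
--     i = 0
--     while i < len(parts):
--         # Check if current part is the start of an acronym sequence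
--         if i < len(parts) and len(parts[i]) == 1:  # Collect all single-letter parts
--             acronym_parts = []
--             while i < len(parts) and len(parts[i]) == 1:
--                 acronym_parts.append(parts[i])
--                 i += 1
--             if acronym_parts:  # If we found an acronym, add it to the result
--                 result.append(''.join(acronym_parts).upper())
--         else: # Handle regular part
--             result.append(parts[i].title())
--             i += 1
--     title = ' '.join(result)
--     title = title.replace('Aws ', 'AWS ')
--     if ignore_prefix:
--         new_title = title
--         if title.startswith('Cost Category '):
--             new_title = title.replace('Cost Category ', '')
--         elif title.startswith('Tag '):
--             new_title = title.replace('Tag ', '')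
--         if title.lower() not in ('service', 'region', 'account'): # leave prefix for special terms
--             title = new_title
--     return title
-- ===== SOURCE B (Python) =====
-- def format_field_name(field_name: str, ignore_prefix: bool = False) -> str:
--     # Single pass with pairwise separators: transform each part independently
--     # (upper for single-char, title otherwise) and glue consecutive parts with
--     # '' when both are single-char (acronym), else ' '. No run grouping needed.
--     title = ''
--     prev_single = None
--     for p in field_name.split('_'):
--         single = len(p) == 1
--         if prev_single is not None:
--             title += '' if (single and prev_single) else ' '
--         title += p.upper() if single else p.title()
--         prev_single = single
--     title = title.replace('Aws ', 'AWS ')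
--     if ignore_prefix:
--         new_title = title
--         if title.startswith('Cost Category '):
--             new_title = title.replace('Cost Category ', '')
--         elif title.startswith('Tag '):
--             new_title = title.replace('Tag ', '')
--         if title.lower() not in ('service', 'region', 'account'):
--             title = new_title
--     return title
-- ===== Notes on version B (the rewrite author's own statement) =====
-- stated objective: simpler
-- what changed: Instead of A's nested while loops that collect maximal runs of single-letter parts and join a result list, B makes one flat pass over the parts transforming each part independently (upper if single-char, title otherwise) and chooses the separator per adjacent pair ('' when both neighbours are single-char, ' ' otherwise), building the title string directly with no result list and no run collection; trailing Aws/prefix transforms unchanged.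
import Mathlib
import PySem

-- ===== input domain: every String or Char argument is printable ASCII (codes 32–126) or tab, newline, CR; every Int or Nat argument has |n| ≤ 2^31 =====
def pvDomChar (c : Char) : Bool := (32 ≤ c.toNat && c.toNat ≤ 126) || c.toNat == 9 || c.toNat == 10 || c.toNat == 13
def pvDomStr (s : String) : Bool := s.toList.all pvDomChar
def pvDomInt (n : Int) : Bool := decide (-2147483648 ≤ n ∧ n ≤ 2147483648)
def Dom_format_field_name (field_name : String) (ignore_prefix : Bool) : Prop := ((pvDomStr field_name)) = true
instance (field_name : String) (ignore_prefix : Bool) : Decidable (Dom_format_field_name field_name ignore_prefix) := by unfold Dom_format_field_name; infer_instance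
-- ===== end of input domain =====

-- B replaces A's run-collecting nested while loops by one flat pass that transforms each
-- split part independently and picks the separator per adjacent pair (objective: simpler).

-- Python str.title(), ported by hand: exact for the ASCII domain, where the "cased"
-- characters of CPython's title() are exactly the letters (PySem.Chars.isalpha).
def pyTitle (s : String) : String :=
  String.ofList ((s.toList.foldl
    (fun (acc : List Char × Bool) c =>
      if PySem.Chars.isalpha c then
        ((if acc.2 then PySem.Chars.lowerChar c else PySem.Chars.upperChar c) :: acc.1, true)
      else (c :: acc.1, false))
    ([], false)).1.reverse)

-- ===== PORT A =====
-- the inner `while i < len(parts) and len(parts[i]) == 1` loop: collect the leading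
-- run of single-character parts, return (run, rest)
def collectAcr : List String → List String × List String
  | [] => ([], [])
  | p :: rest =>
    if PySem.Str.len p == 1 then
      let pr := collectAcr rest
      (p :: pr.1, pr.2)
    else ([], p :: rest)

theorem collectAcr_len : ∀ l : List String, (collectAcr l).2.length ≤ l.length := by
  intro l
  induction l with
  | nil => simp [collectAcr]
  | cons p rest ih =>
    simp only [collectAcr]
    split
    · simpa using Nat.le_succ_of_le ih
    · simp

-- A's outer `while i < len(parts)` loop, as recursion on the remaining suffix of parts
def loopA : List String → List String
  | [] => []
  | p :: rest =>
    if PySem.Str.len p == 1 then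
      let pr := collectAcr rest
      PySem.Str.upper (PySem.Str.join "" (p :: pr.1)) :: loopA pr.2
    else
      pyTitle p :: loopA rest
termination_by l => l.length
decreasing_by
  · exact Nat.lt_succ_of_le (collectAcr_len rest)
  · simp

def format_field_name (field_name : String) (ignore_prefix : Bool) : String :=
  let parts := (PySem.Str.split? field_name "_").getD []
  let result := loopA parts
  let title := PySem.Str.join " " result
  let title := PySem.Str.replace title "Aws " "AWS "
  if ignore_prefix then
    let new_title :=
      if PySem.Str.startswith title "Cost Category " then
        PySem.Str.replace title "Cost Category " ""
      else if PySem.Str.startswith title "Tag " then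
        PySem.Str.replace title "Tag " ""
      else title
    if (["service", "region", "account"] : List String).contains (PySem.Str.lower title) then
      title
    else new_title
  else title

-- ===== PORT B =====
-- one step of B's flat pass: state = (title so far, Option of "previous part was single-char")
def stepB (acc : String × Option Bool) (p : String) : String × Option Bool :=
  let single := PySem.Str.len p == 1
  let sep : String :=
    match acc.2 with
    | none => ""
    | some pb => if single && pb then "" else " "
  (acc.1 ++ sep ++ (if single then PySem.Str.upper p else pyTitle p), some single)

def format_field_name_alt (field_name : String) (ignore_prefix : Bool) : String :=
  let parts := (PySem.Str.split? field_name "_").getD []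
  let title := (parts.foldl stepB ("", none)).1
  let title := PySem.Str.replace title "Aws " "AWS "
  if ignore_prefix then
    let new_title :=
      if PySem.Str.startswith title "Cost Category " then
        PySem.Str.replace title "Cost Category " ""
      else if PySem.Str.startswith title "Tag " then
        PySem.Str.replace title "Tag " ""
      else title
    if (["service", "region", "account"] : List String).contains (PySem.Str.lower title) then
      title
    else new_title
  else title

-- ===== PRECONDITION & SPEC =====
def Spec_format_field_name (field_name : String) (ignore_prefix : Bool) (out : String) : Prop := out = format_field_name_alt field_name ignore_prefix
instance (field_name : String) (ignore_prefix : Bool) (out : String) : Decidable (Spec_format_field_name field_name ignore_prefix out) := by unfold Spec_format_field_name; infer_instance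

-- ===== CLAIM (what is proved, stated in full; the proofs are below) =====
def Claim_equal_format_field_name : Prop := ∀ (field_name : String) (ignore_prefix : Bool), Dom_format_field_name field_name ignore_prefix → Spec_format_field_name field_name ignore_prefix (format_field_name field_name ignore_prefix)

-- ===== LEMMAS AND PROOFS =====

-- ' ' separator that l contributes to the title when something already precedes it
def pref (l : List String) : String :=
  match l with
  | [] => ""
  | _ :: _ => " " ++ PySem.Str.join " " (loopA l)

theorem loopA_nil_iff (l : List String) : loopA l = [] ↔ l = [] := by
  cases l with
  | nil => simp [loopA]
  | cons p rest =>
    simp only [loopA]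
    split <;> simp

theorem upper_append (a b : String) :
    PySem.Str.upper (a ++ b) = PySem.Str.upper a ++ PySem.Str.upper b := by
  simp [PySem.Str.upper, PySem.Chars.upper, String.ofList_append]

theorem join_empty_cons (p : String) (ps : List String) :
    PySem.Str.join "" (p :: ps) = p ++ PySem.Str.join "" ps := by
  cases ps with
  | nil => simp [PySem.Str.join, PySem.Chars.join, List.intercalate]
  | cons q rest =>
    apply String.toList_inj.mp
    simp [PySem.Str.toList_join, PySem.Chars.join_cons_cons, PySem.Str.toList_join]

theorem join_space_cons_loopA (x : String) (r : List String) :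
    PySem.Str.join " " (x :: loopA r) = x ++ pref r := by
  cases hr : loopA r with
  | nil =>
    have : r = [] := (loopA_nil_iff r).mp hr
    subst this
    simp [pref, PySem.Str.join, PySem.Chars.join, List.intercalate]
  | cons y ys =>
    have hrne : r ≠ [] := by
      intro h; subst h; simp [loopA] at hr
    apply String.toList_inj.mp
    cases r with
    | nil => exact absurd rfl hrne
    | cons a as =>
      simp [pref, PySem.Str.toList_join, hr, PySem.Chars.join_cons_cons]

-- the core invariant of B's fold, phrased against A's loop structure
theorem stepB_invariant : ∀ (l : List String),
    (∀ t : String, (l.foldl stepB (t, some false)).1 = t ++ pref l) ∧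
    (∀ t : String, (l.foldl stepB (t, some true)).1 =
      t ++ PySem.Str.upper (PySem.Str.join "" (collectAcr l).1) ++ pref (collectAcr l).2) := by
  intro l
  induction l with
  | nil =>
    constructor <;> intro t <;>
      simp [pref, collectAcr, PySem.Str.join, PySem.Chars.join, List.intercalate, PySem.Str.upper,
        PySem.Chars.upper]
  | cons p rest ih =>
    obtain ⟨ihF, ihT⟩ := ih
    by_cases hp : p.length = 1
    · have hpb : (PySem.Str.len p == 1) = true := by simp [PySem.Str.len, hp]
      constructor
      · intro t
        have := ihT (t ++ " " ++ PySem.Str.upper p)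
        simp only [List.foldl_cons, stepB, hpb, Bool.and_true, Bool.and_false, Bool.true_and,
          Bool.false_and, Bool.false_eq_true, eq_self_iff_true, if_true, if_false] at this ⊢
        rw [this]
        have hloop : loopA (p :: rest) =
            PySem.Str.upper (PySem.Str.join "" (p :: (collectAcr rest).1)) :: loopA (collectAcr rest).2 := by
          simp only [loopA, hpb, eq_self_iff_true, if_true]
        have hpref : pref (p :: rest) = " " ++ PySem.Str.join " " (loopA (p :: rest)) := rfl
        rw [hpref, hloop, join_space_cons_loopA, join_empty_cons, upper_append]
        simp [String.append_assoc]
      · intro t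
        have := ihT (t ++ "" ++ PySem.Str.upper p)
        simp only [List.foldl_cons, stepB, hpb, Bool.and_true, Bool.and_false, Bool.true_and,
          Bool.false_and, Bool.false_eq_true, eq_self_iff_true, if_true, if_false] at this ⊢
        rw [this]
        have hacr : collectAcr (p :: rest) =
            (p :: (collectAcr rest).1, (collectAcr rest).2) := by
          simp only [collectAcr, hpb, eq_self_iff_true, if_true]
        rw [hacr, join_empty_cons, upper_append]
        simp [String.append_assoc]
    · have hpb : (PySem.Str.len p == 1) = false := by simp [PySem.Str.len, hp]
      constructor
      · intro t
        have := ihF (t ++ " " ++ pyTitle p)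
        simp only [List.foldl_cons, stepB, hpb, Bool.and_true, Bool.and_false, Bool.true_and,
          Bool.false_and, Bool.false_eq_true, eq_self_iff_true, if_true, if_false] at this ⊢
        rw [this]
        have hloop : loopA (p :: rest) = pyTitle p :: loopA rest := by
          simp only [loopA, hpb, Bool.false_eq_true, if_false]
        have hpref : pref (p :: rest) = " " ++ PySem.Str.join " " (loopA (p :: rest)) := rfl
        rw [hpref, hloop, join_space_cons_loopA]
        simp [String.append_assoc]
      · intro t
        have := ihF (t ++ " " ++ pyTitle p)
        simp only [List.foldl_cons, stepB, hpb, Bool.and_true, Bool.and_false, Bool.true_and,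
          Bool.false_and, Bool.false_eq_true, eq_self_iff_true, if_true, if_false] at this ⊢
        rw [this]
        have hacr : collectAcr (p :: rest) = ([], p :: rest) := by
          simp only [collectAcr, hpb, Bool.false_eq_true, if_false]
        have hloop : loopA (p :: rest) = pyTitle p :: loopA rest := by
          simp only [loopA, hpb, Bool.false_eq_true, if_false]
        have hpref : pref (p :: rest) = " " ++ PySem.Str.join " " (loopA (p :: rest)) := rfl
        rw [hacr, hpref, hloop, join_space_cons_loopA]
        simp [PySem.Str.join, PySem.Chars.join, List.intercalate, PySem.Str.upper, PySem.Chars.upper,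
          String.append_assoc]

-- B's fold over the parts computes exactly A's joined title
theorem titleB_eq_titleA (parts : List String) :
    (parts.foldl stepB ("", none)).1 = PySem.Str.join " " (loopA parts) := by
  cases parts with
  | nil => simp [loopA, PySem.Str.join, PySem.Chars.join, List.intercalate]
  | cons p rest =>
    by_cases hp : p.length = 1
    · have hpb : (PySem.Str.len p == 1) = true := by simp [PySem.Str.len, hp]
      have := (stepB_invariant rest).2 ("" ++ "" ++ PySem.Str.upper p)
      simp only [List.foldl_cons, stepB, hpb, eq_self_iff_true, if_true] at this ⊢
      rw [this]
      have hloop : loopA (p :: rest) =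
          PySem.Str.upper (PySem.Str.join "" (p :: (collectAcr rest).1)) :: loopA (collectAcr rest).2 := by
        simp only [loopA, hpb, eq_self_iff_true, if_true]
      rw [hloop, join_space_cons_loopA, join_empty_cons, upper_append]
      simp [String.append_assoc]
    · have hpb : (PySem.Str.len p == 1) = false := by simp [PySem.Str.len, hp]
      have := (stepB_invariant rest).1 ("" ++ "" ++ pyTitle p)
      simp only [List.foldl_cons, stepB, hpb, Bool.false_eq_true, if_false] at this ⊢
      rw [this]
      have hloop : loopA (p :: rest) = pyTitle p :: loopA rest := by
        simp only [loopA, hpb, Bool.false_eq_true, if_false]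
      rw [hloop, join_space_cons_loopA]
      simp

-- ===== VERDICT (by name: the statement is the Claim_ definition above) =====
theorem format_field_name_spec : Claim_equal_format_field_name := by
  intro field_name ignore_prefix _
  simp only [Spec_format_field_name, format_field_name, format_field_name_alt, titleB_eq_titleA]
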